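-- pv_equiv track=rewrite | github.com/hanarimawi/AI-MPs | mp3-code/solve.py | genSplits
-- ===== SOURCE A (Python) =====
-- def genSplits(slots, zeros):
--     if slots == 1:
--         return [[zeros]]
--     sol = []
--
--     for i in range(zeros+1):
--         x = genSplits(slots-1, zeros-i)
--         for l in x:
--             sol.append([i]+l)
--     return sol
-- ===== SOURCE B (Python) =====
-- def genSplits(slots, zeros):
--     partials = [([], zeros)]
--     for _ in range(slots - 1):
--         if not partials:
--             break
--         partials = [(p + [i], r - i) for (p, r) in partials for i in range(r + 1)]
--     return [p + [r] for (p, r) in partials]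
-- ===== Notes on version B (the rewrite author's own statement) =====
-- stated objective: alternative
-- what changed: Replaces the recursion over slots by an iterative breadth-first expansion: a list of (prefix, remaining) partial splits is widened slots-1 times by a comprehension (stopping early once it is empty), then each remaining count is appended as the last part; no recursion.
-- outside the precondition, e.g. on genSplits(0, -1): A returns [], B returns [[-1]]
import Mathlib
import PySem

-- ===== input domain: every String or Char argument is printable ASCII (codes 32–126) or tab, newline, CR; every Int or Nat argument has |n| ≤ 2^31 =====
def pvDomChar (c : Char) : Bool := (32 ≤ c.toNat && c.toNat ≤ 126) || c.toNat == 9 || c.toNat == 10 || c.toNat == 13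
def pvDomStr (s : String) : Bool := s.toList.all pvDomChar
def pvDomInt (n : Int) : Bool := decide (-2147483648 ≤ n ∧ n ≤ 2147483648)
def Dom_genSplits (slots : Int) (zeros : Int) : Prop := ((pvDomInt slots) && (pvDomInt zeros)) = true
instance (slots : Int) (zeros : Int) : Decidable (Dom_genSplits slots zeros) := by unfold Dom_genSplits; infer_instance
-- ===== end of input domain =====

-- B replaces A's recursion over slots by an iterative breadth-first expansion of partial splits; alternative decomposition, same cost.

-- ===== PORT A =====
-- A recurses on slots; the fuel argument (slots.toNat) only makes the recursion total
-- in Lean — under Pre_ (slots ≥ 1) the fuel never runs out and the port is exact.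
def genSplitsA : Nat → Int → Int → List (List Int)
  | 0, _, _ => []
  | fuel+1, slots, zeros =>
    if slots == 1 then [[zeros]]
    else
      (PySem.List.pyRange 0 (zeros+1) 1).foldl
        (fun sol i =>
          (genSplitsA fuel (slots-1) (zeros-i)).foldl (fun sol l => sol ++ [i :: l]) sol)
        []

def genSplits (slots : Int) (zeros : Int) : List (List Int) :=
  genSplitsA slots.toNat slots zeros

-- ===== PORT B =====
-- the 'if not partials: break' of Source B's loop becomes the early-exit test of altExpand
def altExpand : Nat → List (List Int × Int) → List (List Int × Int)
  | 0, ps => ps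
  | n+1, ps =>
    if ps = [] then ps
    else altExpand n
      (ps.flatMap (fun pr =>
        (PySem.List.pyRange 0 (pr.2 + 1) 1).map (fun i => (pr.1 ++ [i], pr.2 - i))))

def genSplits_alt (slots : Int) (zeros : Int) : List (List Int) :=
  (altExpand (slots - 1).toNat [(([] : List Int), zeros)]).map (fun pr => pr.1 ++ [pr.2])

-- ===== PRECONDITION & SPEC =====
-- Pre_ restricts to the natural domain slots ≥ 1: for slots ≤ 0 the Python A either hits a
-- RecursionError (zeros ≥ 0) or returns [] only because its loop range is empty (zeros < 0),
-- a degenerate non-domain input where B returns [[zeros]] instead.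
def Pre_genSplits (slots : Int) (zeros : Int) : Prop := 1 ≤ slots
instance (slots : Int) (zeros : Int) : Decidable (Pre_genSplits slots zeros) := by
  unfold Pre_genSplits; infer_instance

def pvWitness_genSplits : Int × Int := (3, 4)

def Spec_genSplits (slots : Int) (zeros : Int) (out : List (List Int)) : Prop :=
  out = genSplits_alt slots zeros
instance (slots : Int) (zeros : Int) (out : List (List Int)) : Decidable (Spec_genSplits slots zeros out) := by
  unfold Spec_genSplits; infer_instance

-- ===== CLAIM (what is proved, stated in full; the proofs are below) =====
def Claim_equal_genSplits : Prop := ∀ (slots : Int) (zeros : Int), Dom_genSplits slots zeros → Pre_genSplits slots zeros → Spec_genSplits slots zeros (genSplits slots zeros)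

-- ===== LEMMAS AND PROOFS =====

-- Common clean recursion both ports are reduced to.
def specG : Nat → Int → List (List Int)
  | 0, z => [[z]]
  | n+1, z => (PySem.List.pyRange 0 (z+1) 1).flatMap (fun i => (specG n (z-i)).map (fun l => i :: l))

-- A-side: with slots = n+1 and fuel = n+1 the port computes specG n.
theorem genSplitsA_eq_specG : ∀ (n : Nat) (z : Int),
    genSplitsA (n+1) ((n : Int)+1) z = specG n z := by
  intro n
  induction n with
  | zero => intro z; simp [genSplitsA, specG]
  | succ m ih =>
    intro z
    rw [genSplitsA, if_neg (by simp; omega)]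
    have hfun : (fun (sol : List (List Int)) (i : Int) =>
        (genSplitsA (m+1) (((m+1 : Nat) : Int) + 1 - 1) (z-i)).foldl (fun sol l => sol ++ [i :: l]) sol)
        = (fun sol i => sol ++ (specG m (z - i)).map (fun l => i :: l)) := by
      funext sol i
      have h1 : (((m+1 : Nat) : Int) + 1 - 1) = (m : Int) + 1 := by push_cast; ring
      rw [h1, ih (z - i), PySem.List.foldl_append_singleton_eq_map]
    rw [hfun, PySem.List.foldl_append_eq_flatMap]
    simp [specG]

-- B-side machinery: one expansion step, and n-fold iteration of it.
def stepB (ps : List (List Int × Int)) : List (List Int × Int) :=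
  ps.flatMap (fun pr => (PySem.List.pyRange 0 (pr.2 + 1) 1).map (fun i => (pr.1 ++ [i], pr.2 - i)))

def stepN : Nat → List (List Int × Int) → List (List Int × Int)
  | 0, ps => ps
  | n+1, ps => stepN n (stepB ps)

theorem stepN_nil' (n : Nat) : stepN n [] = [] := by
  induction n with
  | zero => rfl
  | succ m ih => simpa [stepN, stepB] using ih

theorem altExpand_eq_stepN : ∀ (n : Nat) (ps : List (List Int × Int)),
    altExpand n ps = stepN n ps := by
  intro n
  induction n with
  | zero => intro ps; rfl
  | succ m ih =>
    intro ps
    by_cases h : ps = []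
    · subst h
      show (if ([] : List (List Int × Int)) = [] then _ else _) = _
      rw [if_pos rfl, stepN_nil']
    · show (if ps = [] then ps else altExpand m (stepB ps)) = stepN m (stepB ps)
      rw [if_neg h]; exact ih (stepB ps)

theorem stepN_append (n : Nat) : ∀ (xs ys : List (List Int × Int)),
    stepN n (xs ++ ys) = stepN n xs ++ stepN n ys := by
  induction n with
  | zero => intro xs ys; rfl
  | succ m ih => intro xs ys; simp [stepN, stepB, List.flatMap_append, ih]

theorem stepN_map {A : Type} (n : Nat) (l : List A) (g : A -> List Int × Int) :
    stepN n (l.map g) = l.flatMap (fun x => stepN n [g x]) := by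
  induction l with
  | nil => simp [stepN_nil']
  | cons a t ih =>
    have h : (a :: t).map g = [g a] ++ t.map g := by simp
    rw [h, stepN_append, ih, List.flatMap_cons]

theorem stepN_spec : ∀ (n : Nat) (p : List Int) (z : Int),
    (stepN n [(p, z)]).map (fun pr => pr.1 ++ [pr.2]) = (specG n z).map (fun l => p ++ l) := by
  intro n
  induction n with
  | zero => intro p z; simp [stepN, specG]
  | succ m ih =>
    intro p z
    show (stepN m (stepB [(p, z)])).map (fun pr => pr.1 ++ [pr.2]) = _
    have hsb : stepB [(p, z)]
        = (PySem.List.pyRange 0 (z+1) 1).map (fun i => (p ++ [i], z - i)) := by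
      simp [stepB]
    rw [hsb, stepN_map, List.map_flatMap]
    simp only [specG, List.map_flatMap]
    congr 1
    funext i
    rw [ih (p ++ [i]) (z - i)]
    simp [List.map_map, Function.comp_def]

-- ===== VERDICT (by name: the statement is the Claim_ definition above) =====
theorem genSplits_spec : Claim_equal_genSplits := by
  intro slots zeros _ hpre
  unfold Spec_genSplits genSplits genSplits_alt
  obtain ⟨n, hn⟩ : ∃ n : Nat, slots = (n : Int) + 1 :=
    ⟨(slots - 1).toNat, by unfold Pre_genSplits at hpre; omega⟩
  subst hn
  have htn : ((n : Int) + 1).toNat = n + 1 := by omega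
  have htn1 : ((n : Int) + 1 - 1).toNat = n := by omega
  rw [htn, htn1, genSplitsA_eq_specG, altExpand_eq_stepN, stepN_spec]
  simp
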